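-- pv_equiv track=rewrite | github.com/jeromecamilleri/codinGame | Numéros de téléphone - Code Golf.py | chercheNum
-- ===== SOURCE A (Python) =====
-- def chercheNum(tab, num):
--     i=0
--     for elt in tab:
--       if elt == []:
--         return -1
--       elif elt[0]==num:
--          return i
--       else:
--          i += 1
--     return -1
-- ===== SOURCE B (Python) =====
-- def chercheNum(tab, num):
--     # Collect first elements of the prefix of tab before any empty sublist,
--     # then look num up in that list of heads.
--     heads = []
--     for e in tab:
--         if not e:
--             break
--         heads.append(e[0])
--     try:
--         return heads.index(num)
--     except ValueError:
--         return -1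
-- ===== Notes on version B (the rewrite author's own statement) =====
-- stated objective: idiomatic
-- what changed: B first extracts the list of head elements up to the first empty sublist (takewhile-style), then finds num with list.index instead of carrying a manual counter through a single search loop.
import Mathlib
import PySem

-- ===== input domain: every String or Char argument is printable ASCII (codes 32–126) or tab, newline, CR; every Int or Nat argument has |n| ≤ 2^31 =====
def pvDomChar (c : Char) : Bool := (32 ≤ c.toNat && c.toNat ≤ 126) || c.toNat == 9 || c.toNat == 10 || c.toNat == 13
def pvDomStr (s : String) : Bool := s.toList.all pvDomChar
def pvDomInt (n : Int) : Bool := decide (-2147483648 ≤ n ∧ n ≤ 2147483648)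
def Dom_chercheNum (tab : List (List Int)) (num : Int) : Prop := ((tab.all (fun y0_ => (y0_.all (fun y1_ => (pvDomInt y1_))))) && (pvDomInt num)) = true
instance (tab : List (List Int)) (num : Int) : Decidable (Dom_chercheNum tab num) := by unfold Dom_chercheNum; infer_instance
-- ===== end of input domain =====

-- B replaces A's counter-carrying search loop with a takewhile-style heads extraction followed by list.index (idiomatic; same O(n) cost).


-- ===== PORT A =====
-- Port of A: single loop with counter i; empty sublist returns -1 immediately.
def chercheNumGo (num : Int) (i : Int) : List (List Int) → Int
  | [] => -1
  | elt :: rest =>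
    if elt = [] then -1
    else if elt.headI = num then i
    else chercheNumGo num (i + 1) rest

def chercheNum (tab : List (List Int)) (num : Int) : Int :=
  chercheNumGo num 0 tab

-- ===== PORT B =====
-- Port of B: build the list of heads before the first empty sublist, then heads.index(num).
def chHeads : List (List Int) → List Int
  | [] => []
  | e :: rest => if e = [] then [] else e.headI :: chHeads rest

def chercheNum_alt (tab : List (List Int)) (num : Int) : Int :=
  match PySem.List.index? (chHeads tab) num with
  | some i => (i : Int)
  | none => -1

-- ===== PRECONDITION & SPEC =====
def Spec_chercheNum (tab : List (List Int)) (num : Int) (out : Int) : Prop := out = chercheNum_alt tab num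
instance (tab : List (List Int)) (num : Int) (out : Int) : Decidable (Spec_chercheNum tab num out) := by unfold Spec_chercheNum; infer_instance

-- ===== CLAIM (what is proved, stated in full; the proofs are below) =====
def Claim_equal_chercheNum : Prop := ∀ (tab : List (List Int)) (num : Int), Dom_chercheNum tab num → Spec_chercheNum tab num (chercheNum tab num)

-- ===== LEMMAS AND PROOFS =====

lemma chercheNumGo_eq (num : Int) (tab : List (List Int)) (i : Int) :
    chercheNumGo num i tab =
      match PySem.List.index? (chHeads tab) num with
      | some j => i + (j : Int)
      | none => -1 := by
  induction tab generalizing i with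
  | nil => simp [chercheNumGo, chHeads, PySem.List.index?_eq_idxOf?, List.idxOf?]
  | cons e rest ih =>
    by_cases he : e = []
    · simp [chercheNumGo, chHeads, he, PySem.List.index?_eq_idxOf?, List.idxOf?]
    · by_cases hh : e.headI = num
      · have h1 : chHeads (e :: rest) = e.headI :: chHeads rest := by simp [chHeads, he]
        rw [show chercheNumGo num i (e :: rest) = i by simp [chercheNumGo, he, hh],
           h1, hh, PySem.List.index?_cons_self]
        simp
      · rw [show chercheNumGo num i (e :: rest) = chercheNumGo num (i + 1) rest by
              simp [chercheNumGo, he, hh],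
            ih]
        have : chHeads (e :: rest) = e.headI :: chHeads rest := by simp [chHeads, he]
        rw [this, PySem.List.index?_cons_of_ne (chHeads rest) hh]
        cases PySem.List.index? (chHeads rest) num with
        | none => simp
        | some j => simp; push_cast; ring

-- ===== VERDICT (by name: the statement is the Claim_ definition above) =====
theorem chercheNum_spec : Claim_equal_chercheNum := by
  intro tab num _
  unfold Spec_chercheNum chercheNum chercheNum_alt
  rw [chercheNumGo_eq]
  cases PySem.List.index? (chHeads tab) num <;> simp
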